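-- pv_equiv track=rewrite | github.com/enigma/aoc | python/2022/12.py | parse
-- ===== SOURCE A (Python) =====
-- def parse(text):
--     start, end = None, None
--     result = []
--     for y, row in enumerate(text.strip().split()):
--         this = []
--         for x, h in enumerate(row):
--             match h:
--                 case 'S':
--                     this.append(ord('a'))
--                     start = (y, x)
--                 case 'E':
--                     this.append(ord('z'))
--                     end = (y, x)
--                 case _:
--                     this.append(ord(h))
--         result.append(this)
--     return result, start, end
-- ===== SOURCE B (Python) =====
-- def parse(text):
--     rows = text.strip().split()
--     grid = [[97 if h == 'S' else 122 if h == 'E' else ord(h) for h in row]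
--             for row in rows]
--     pos = {h: (y, x) for y, row in enumerate(rows) for x, h in enumerate(row)}
--     return grid, pos.get('S'), pos.get('E')
-- ===== Notes on version B (the rewrite author's own statement) =====
-- stated objective: alternative
-- what changed: Replaces A's single stateful loop (mutable start/end threaded while building each row) by a side-effect-free pipeline: the grid is a nested comprehension and the marker positions come from a dict comprehension mapping each character to its position, read out with pos.get('S')/pos.get('E').
import Mathlib
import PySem

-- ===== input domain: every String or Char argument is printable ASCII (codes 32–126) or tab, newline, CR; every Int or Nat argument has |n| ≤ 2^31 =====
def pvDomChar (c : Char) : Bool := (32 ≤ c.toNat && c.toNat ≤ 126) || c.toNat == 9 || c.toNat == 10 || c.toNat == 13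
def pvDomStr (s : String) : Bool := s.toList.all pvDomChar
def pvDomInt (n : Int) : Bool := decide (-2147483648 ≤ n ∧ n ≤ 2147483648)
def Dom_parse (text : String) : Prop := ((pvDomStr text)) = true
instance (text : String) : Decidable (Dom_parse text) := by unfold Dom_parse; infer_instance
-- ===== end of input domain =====

-- B replaces A's single stateful loop (mutable start/end threaded through the row walk)
-- by a side-effect-free pipeline: a nested comprehension for the grid and a dict
-- comprehension char ↦ position, read with get('S')/get('E') (alternative, same cost).

-- ===== PORT A =====
-- literal transliteration of A's nested loop with mutable (result, start, end)
def parse (text : String) : List (List Int) × (Option (Int × Int)) × (Option (Int × Int)) :=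
  (PySem.List.enumerate (PySem.Str.split₀ (PySem.Str.strip text))).foldl
    (fun (acc : List (List Int) × Option (Int × Int) × Option (Int × Int)) yrow =>
      let this := (PySem.List.enumerate yrow.2.toList).foldl
        (fun (a : List Int × Option (Int × Int) × Option (Int × Int)) xh =>
          if xh.2 = 'S' then (a.1 ++ [97], some (yrow.1, xh.1), a.2.2)
          else if xh.2 = 'E' then (a.1 ++ [122], a.2.1, some (yrow.1, xh.1))
          else (a.1 ++ [(xh.2.toNat : Int)], a.2.1, a.2.2))
        ([], acc.2.1, acc.2.2)
      (acc.1 ++ [this.1], this.2.1, this.2.2))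
    ([], none, none)

-- ===== PORT B =====
def parse_alt (text : String) : List (List Int) × (Option (Int × Int)) × (Option (Int × Int)) :=
  let rows := PySem.Str.split₀ (PySem.Str.strip text)
  let grid := rows.map (fun row => row.toList.map
    (fun h => if h = 'S' then (97 : Int) else if h = 'E' then 122 else (h.toNat : Int)))
  -- dict comprehension {h: (y, x) …}: successive inserts, later keys overwrite
  let pos := ((PySem.List.enumerate rows).flatMap
      (fun p => (PySem.List.enumerate p.2.toList).map (fun q => (q.2, (p.1, q.1))))).foldl
    (fun (d : PySem.Dict Char (Int × Int)) c => d.insert c.1 c.2) PySem.Dict.empty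
  (grid, pos.get? 'S', pos.get? 'E')

-- ===== PRECONDITION & SPEC =====
def Spec_parse (text : String) (out : List (List Int) × (Option (Int × Int)) × (Option (Int × Int))) : Prop := out = parse_alt text
instance (text : String) (out : List (List Int) × (Option (Int × Int)) × (Option (Int × Int))) : Decidable (Spec_parse text out) := by unfold Spec_parse; infer_instance

-- ===== CLAIM (what is proved, stated in full; the proofs are below) =====
def Claim_equal_parse : Prop := ∀ (text : String), Dom_parse text → Spec_parse text (parse text)

-- ===== LEMMAS AND PROOFS =====

-- inner loop of A, over one row's characters
theorem inner_eq (y : Int) (cs : List Char) (x : Int) (res : List Int)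
    (s e : Option (Int × Int)) :
    (PySem.List.enumerate cs x).foldl
        (fun (a : List Int × Option (Int × Int) × Option (Int × Int)) xh =>
          if xh.2 = 'S' then (a.1 ++ [97], some (y, xh.1), a.2.2)
          else if xh.2 = 'E' then (a.1 ++ [122], a.2.1, some (y, xh.1))
          else (a.1 ++ [(xh.2.toNat : Int)], a.2.1, a.2.2))
        (res, s, e)
      = (res ++ cs.map (fun h => if h = 'S' then (97 : Int) else if h = 'E' then 122 else (h.toNat : Int)),
         ((PySem.List.enumerate cs x).map (fun q => ((y, q.1), q.2))).foldl
           (fun acc c => if c.2 = 'S' then some c.1 else acc) s,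
         ((PySem.List.enumerate cs x).map (fun q => ((y, q.1), q.2))).foldl
           (fun acc c => if c.2 = 'E' then some c.1 else acc) e) := by
  induction cs generalizing x res s e with
  | nil => simp [PySem.List.enumerate_nil]
  | cons c cs ih =>
    simp only [PySem.List.enumerate_cons, List.foldl_cons, List.map_cons]
    by_cases hS : c = 'S'
    · simp [hS, ih]
    · by_cases hE : c = 'E' <;> simp [hS, hE, ih]

-- outer loop of A, over the enumerated rows
theorem outer_eq (rows : List String) (y : Int) (res : List (List Int))
    (s e : Option (Int × Int)) :
    (PySem.List.enumerate rows y).foldl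
      (fun (acc : List (List Int) × Option (Int × Int) × Option (Int × Int)) yrow =>
        let this := (PySem.List.enumerate yrow.2.toList).foldl
          (fun (a : List Int × Option (Int × Int) × Option (Int × Int)) xh =>
            if xh.2 = 'S' then (a.1 ++ [97], some (yrow.1, xh.1), a.2.2)
            else if xh.2 = 'E' then (a.1 ++ [122], a.2.1, some (yrow.1, xh.1))
            else (a.1 ++ [(xh.2.toNat : Int)], a.2.1, a.2.2))
          ([], acc.2.1, acc.2.2)
        (acc.1 ++ [this.1], this.2.1, this.2.2))
      (res, s, e)
    = (res ++ rows.map (fun row => row.toList.map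
         (fun h => if h = 'S' then (97 : Int) else if h = 'E' then 122 else (h.toNat : Int))),
       (((PySem.List.enumerate rows y).flatMap
          (fun p => (PySem.List.enumerate p.2.toList).map (fun q => ((p.1, q.1), q.2)))).foldl
         (fun acc c => if c.2 = 'S' then some c.1 else acc) s),
       (((PySem.List.enumerate rows y).flatMap
          (fun p => (PySem.List.enumerate p.2.toList).map (fun q => ((p.1, q.1), q.2)))).foldl
         (fun acc c => if c.2 = 'E' then some c.1 else acc) e)) := by
  induction rows generalizing y res s e with
  | nil => simp [PySem.List.enumerate_nil]
  | cons r rows ih =>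
    simp only [PySem.List.enumerate_cons, List.foldl_cons, List.map_cons, List.flatMap_cons,
      List.foldl_append]
    rw [inner_eq]
    simp [ih]

-- a fold of inserts, looked up at ch, is the last-overwrite fold of the values at ch
theorem get?_foldl_insert (L : List (Char × (Int × Int))) (d : PySem.Dict Char (Int × Int))
    (ch : Char) :
    (L.foldl (fun (d : PySem.Dict Char (Int × Int)) c => d.insert c.1 c.2) d).get? ch
      = L.foldl (fun acc c => if c.1 = ch then some c.2 else acc) (d.get? ch) := by
  induction L generalizing d with
  | nil => rfl
  | cons c L ih =>
    simp only [List.foldl_cons, ih]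
    by_cases h : c.1 = ch
    · subst h; simp [PySem.Dict.get?_insert_self]
    · simp [PySem.Dict.get?_insert_of_ne d c.2 (fun he => h he.symm), h]

-- B's key-first cells are the swap of A's position-first cells
theorem cells_swap (rows : List String) (y : Int) :
    ((PySem.List.enumerate rows y).flatMap
        (fun p => (PySem.List.enumerate p.2.toList).map (fun q => (q.2, (p.1, q.1)))))
      = ((PySem.List.enumerate rows y).flatMap
          (fun p => (PySem.List.enumerate p.2.toList).map (fun q => ((p.1, q.1), q.2)))).map
        (fun c => (c.2, c.1)) := by
  simp [List.map_flatMap, List.map_map, Function.comp_def]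

-- ===== VERDICT (by name: the statement is the Claim_ definition above) =====
theorem parse_spec : Claim_equal_parse := by
  intro text _
  show parse text = parse_alt text
  have hB : parse_alt text =
      ((PySem.Str.split₀ (PySem.Str.strip text)).map (fun row => row.toList.map
         (fun h => if h = 'S' then (97 : Int) else if h = 'E' then 122 else (h.toNat : Int))),
       (((PySem.List.enumerate (PySem.Str.split₀ (PySem.Str.strip text))).flatMap
          (fun p => (PySem.List.enumerate p.2.toList).map (fun q => (q.2, (p.1, q.1))))).foldl
         (fun (d : PySem.Dict Char (Int × Int)) c => d.insert c.1 c.2) PySem.Dict.empty).get? 'S',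
       (((PySem.List.enumerate (PySem.Str.split₀ (PySem.Str.strip text))).flatMap
          (fun p => (PySem.List.enumerate p.2.toList).map (fun q => (q.2, (p.1, q.1))))).foldl
         (fun (d : PySem.Dict Char (Int × Int)) c => d.insert c.1 c.2) PySem.Dict.empty).get? 'E') := rfl
  rw [hB, get?_foldl_insert, get?_foldl_insert, cells_swap, List.foldl_map, List.foldl_map]
  unfold parse
  rw [outer_eq]
  simp
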